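-- pv_equiv track=rewrite | github.com/davitf/numbermatch | numbermatch.py | find_all_moves
-- ===== SOURCE A (Python) =====
-- from typing import Tuple
--
-- ROW_SIZE = 9
--
-- def is_valid_pair(board: list[int], i: int, j: int) -> bool:
--     """
--     Check if two cells form a valid pair (same number or sum to 10).
--     Returns True if valid, False otherwise.
--     """
--     val_i = board[i]
--     val_j = board[j]
--
--     # Both must be numbers (not 0 or -1)
--     if val_i <= 0 or val_j <= 0:
--         return False
--
--     # Same number or sum to 10
--     return val_i == val_j or val_i + val_j == 10
--
-- def _find_next_in_direction(
--     board: list[int], row: int, col: int, d_row: int, d_col: int, n_rows: int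
-- ) -> int:
--     """Find the next non-empty cell starting from (row,col) going in direction
--     (d_row, d_col), skipping empty cells. Returns the 1D index or -1."""
--     r, c = row + d_row, col + d_col
--     while 0 <= r < n_rows and 0 <= c < ROW_SIZE:
--         idx = r * ROW_SIZE + c
--         if board[idx] > 0:
--             return idx
--         r += d_row
--         c += d_col
--     return -1
--
-- def find_all_moves(board: list[int]) -> list[Tuple[int, int]]:
--     """
--     Find all possible moves (pairs that can be removed).
--     For each active cell, checks 4 directions for the nearest non-empty neighbor:
--       - horizontal/adjacent (next in 1D order, wrapping across rows)
--       - vertical (down, same column)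
--       - diagonal down-right
--       - diagonal down-left
--     Returns a list of tuples (i, j) where i < j are indices of the pair.
--     """
--     moves: list[Tuple[int, int]] = []
--     n = len(board)
--     n_rows = n // ROW_SIZE
--
--     for i in range(n):
--         if board[i] <= 0:
--             continue
--
--         vi = board[i]
--         row_i, col_i = i // ROW_SIZE, i % ROW_SIZE
--
--         # 1) Horizontal / adjacent: next non-empty cell in 1D order
--         for k in range(i + 1, n):
--             if board[k] > 0:
--                 if vi == board[k] or vi + board[k] == 10:
--                     moves.append((i, k))
--                 break
--
--         # 2) Vertical (down): same column, next row with non-empty cell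
--         j = _find_next_in_direction(board, row_i, col_i, 1, 0, n_rows)
--         if j > i and is_valid_pair(board, i, j):
--             moves.append((i, j))
--
--         # 3) Diagonal down-right
--         j = _find_next_in_direction(board, row_i, col_i, 1, 1, n_rows)
--         if j > i and is_valid_pair(board, i, j):
--             moves.append((i, j))
--
--         # 4) Diagonal down-left
--         j = _find_next_in_direction(board, row_i, col_i, 1, -1, n_rows)
--         if j > i and is_valid_pair(board, i, j):
--             moves.append((i, j))
--
--     return moves
-- ===== SOURCE B (Python) =====
-- from typing import Tuple
--
-- ROW_SIZE = 9
--
-- def find_all_moves(board: list[int]) -> list[Tuple[int, int]]: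
--     """Same moves as the rescanning version, but every 'nearest non-empty
--     neighbour' query is answered from successor tables built in two auxiliary
--     passes (a backward pass for the 1D successor, one bottom-up pass over rows
--     with three shifted 9-vectors for the vertical/diagonal successors)."""
--     n = len(board)
--     n_rows = n // ROW_SIZE
--     moves: list[Tuple[int, int]] = []
--
--     # next non-empty cell in 1D order, built back-to-front
--     nxt1 = [-1] * n
--     last = -1
--     for k in range(n - 1, -1, -1):
--         nxt1[k] = last
--         if board[k] > 0:
--             last = k
--
--     # per-row answer tables, built bottom-up.  col_v/dr_v/dl_v[c] = first
--     # non-empty cell at or below the frontier row along the column / down-right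
--     # diagonal / down-left diagonal starting at column c.
--     down_rows: list[list[int]] = []
--     dr_rows: list[list[int]] = []
--     dl_rows: list[list[int]] = []
--     col_v = [-1] * ROW_SIZE
--     dr_v = [-1] * ROW_SIZE
--     dl_v = [-1] * ROW_SIZE
--     for r in range(n_rows - 1, -1, -1):
--         base = r * ROW_SIZE
--         down_rows.append(col_v[:])
--         dr_rows.append([dr_v[c + 1] if c < ROW_SIZE - 1 else -1 for c in range(ROW_SIZE)])
--         dl_rows.append([dl_v[c - 1] if c > 0 else -1 for c in range(ROW_SIZE)])
--         col_v = [base + c if board[base + c] > 0 else col_v[c] for c in range(ROW_SIZE)]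
--         dr_v = [base + c if board[base + c] > 0
--                 else (dr_v[c + 1] if c < ROW_SIZE - 1 else -1) for c in range(ROW_SIZE)]
--         dl_v = [base + c if board[base + c] > 0
--                 else (dl_v[c - 1] if c > 0 else -1) for c in range(ROW_SIZE)]
--     down_rows.reverse()
--     dr_rows.reverse()
--     dl_rows.reverse()
--
--     for i in range(n):
--         vi = board[i]
--         if vi <= 0:
--             continue
--         k = nxt1[i]
--         if k != -1 and (vi == board[k] or vi + board[k] == 10):
--             moves.append((i, k))
--         r, c = divmod(i, ROW_SIZE)
--         if r < n_rows:
--             for tbl in (down_rows, dr_rows, dl_rows):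
--                 j = tbl[r][c]
--                 if j != -1 and (vi == board[j] or vi + board[j] == 10):
--                     moves.append((i, j))
--     return moves
-- ===== Notes on version B (the rewrite author's own statement) =====
-- stated objective: alternative
-- what changed: A rescans the board for every cell (a forward scan for the 1D successor and three while-loop walks per cell, quadratic in the worst case); B instead precomputes all next-non-empty successors in two auxiliary passes - a backward pass for the 1D successor and one bottom-up pass over rows carrying three shifted 9-entry vectors for the column/diagonal successors - and answers each cell from those tables.
import Mathlib
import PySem

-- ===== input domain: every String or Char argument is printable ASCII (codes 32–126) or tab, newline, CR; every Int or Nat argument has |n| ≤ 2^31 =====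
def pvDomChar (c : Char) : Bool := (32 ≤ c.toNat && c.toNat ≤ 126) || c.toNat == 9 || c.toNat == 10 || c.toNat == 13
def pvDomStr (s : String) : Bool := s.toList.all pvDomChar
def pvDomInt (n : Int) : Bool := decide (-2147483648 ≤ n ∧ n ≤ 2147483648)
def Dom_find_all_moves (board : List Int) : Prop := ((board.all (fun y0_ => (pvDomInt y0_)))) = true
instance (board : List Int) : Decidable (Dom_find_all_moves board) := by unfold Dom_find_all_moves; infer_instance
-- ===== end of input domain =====

-- B answers every 'nearest non-empty neighbour' query from successor tables built in two
-- auxiliary passes (a backward pass for the 1D successor; a bottom-up pass over rows with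
-- three shifted 9-vectors for the column/diagonal successors) instead of A's per-cell scans.

-- ===== PORT A =====
-- board[x] is ported as pyGetD board x 0: every access A performs is in range
-- (indices come from range(...) or from the bounds-checked direction scan).
def fam_is_valid_pair (board : List Int) (i j : Int) : Bool :=
  let val_i := PySem.List.pyGetD board i 0
  let val_j := PySem.List.pyGetD board j 0
  if val_i ≤ 0 ∨ val_j ≤ 0 then false
  else decide (val_i = val_j ∨ val_i + val_j = 10)

-- the while loop of _find_next_in_direction; the fuel (n_rows+1) is an upper bound on the
-- iteration count for the d_row = 1 calls find_all_moves makes (r increases towards n_rows)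
def fam_findNext (board : List Int) : Int → Int → Int → Int → Int → Nat → Int
  | _, _, _, _, _, 0 => -1
  | r, c, d_row, d_col, n_rows, fuel + 1 =>
    if 0 ≤ r ∧ r < n_rows ∧ 0 ≤ c ∧ c < 9 then
      if 0 < PySem.List.pyGetD board (r * 9 + c) 0 then r * 9 + c
      else fam_findNext board (r + d_row) (c + d_col) d_row d_col n_rows fuel
    else -1

-- the inner 'for k in range(i+1, n): … break' loop
def fam_horiz (board : List Int) (i vi : Int) : List Int → List (Int × Int) → List (Int × Int)
  | [], moves => moves
  | k :: ks, moves =>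
    if 0 < PySem.List.pyGetD board k 0 then
      if vi = PySem.List.pyGetD board k 0 ∨ vi + PySem.List.pyGetD board k 0 = 10 then
        moves ++ [(i, k)]
      else moves
    else fam_horiz board i vi ks moves

def find_all_moves (board : List Int) : List (Int × Int) :=
  let n : Int := board.length
  let n_rows := PySem.Int.floordiv n 9
  (PySem.List.pyRange 0 n 1).foldl (fun moves i =>
    if PySem.List.pyGetD board i 0 ≤ 0 then moves
    else
      let vi := PySem.List.pyGetD board i 0
      let row_i := PySem.Int.floordiv i 9
      let col_i := PySem.Int.mod i 9
      let moves := fam_horiz board i vi (PySem.List.pyRange (i + 1) n 1) moves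
      let j := fam_findNext board (row_i + 1) (col_i + 0) 1 0 n_rows (n_rows.toNat + 1)
      let moves := if j > i ∧ fam_is_valid_pair board i j = true then moves ++ [(i, j)] else moves
      let j := fam_findNext board (row_i + 1) (col_i + 1) 1 1 n_rows (n_rows.toNat + 1)
      let moves := if j > i ∧ fam_is_valid_pair board i j = true then moves ++ [(i, j)] else moves
      let j := fam_findNext board (row_i + 1) (col_i + -1) 1 (-1) n_rows (n_rows.toNat + 1)
      if j > i ∧ fam_is_valid_pair board i j = true then moves ++ [(i, j)] else moves
  ) []

-- ===== PORT B =====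
-- the backward 'for k in range(n-1,-1,-1)' pass of Source B, expressed structurally:
-- returns (nxt1 for this suffix, first non-empty index of this suffix)
def famB_nxt1 : List Int → Int → List Int × Int
  | [], _ => ([], -1)
  | v :: rest, idx =>
    let p := famB_nxt1 rest (idx + 1)
    (p.2 :: p.1, if 0 < v then idx else p.2)

-- the bottom-up 'for r in range(n_rows-1,-1,-1)' pass of Source B: t = rows already
-- processed from the bottom; returns ((down_rows, dr_rows, dl_rows) top-down for
-- those rows, (col_v, dr_v, dl_v))
def famB_rows (board : List Int) (n_rows : Int) : Nat →
    (List (List Int) × List (List Int) × List (List Int)) × (List Int × List Int × List Int)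
  | 0 => (([], [], []),
          (List.replicate 9 (-1), List.replicate 9 (-1), List.replicate 9 (-1)))
  | t + 1 =>
    let res := famB_rows board n_rows t
    let colV := res.2.1
    let drV := res.2.2.1
    let dlV := res.2.2.2
    let base := (n_rows - (t + 1)) * 9
    let drRow := (List.range 9).map (fun c => if c < 8 then drV.getD (c + 1) (-1) else -1)
    let dlRow := (List.range 9).map (fun c => if 0 < c then dlV.getD (c - 1) (-1) else -1)
    let colV' := (List.range 9).map (fun (c : Nat) =>
      if 0 < PySem.List.pyGetD board (base + (c : Int)) 0 then base + (c : Int) else colV.getD c (-1))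
    let drV' := (List.range 9).map (fun (c : Nat) =>
      if 0 < PySem.List.pyGetD board (base + (c : Int)) 0 then base + (c : Int)
      else if c < 8 then drV.getD (c + 1) (-1) else -1)
    let dlV' := (List.range 9).map (fun (c : Nat) =>
      if 0 < PySem.List.pyGetD board (base + (c : Int)) 0 then base + (c : Int)
      else if 0 < c then dlV.getD (c - 1) (-1) else -1)
    ((colV :: res.1.1, drRow :: res.1.2.1, dlRow :: res.1.2.2), (colV', drV', dlV'))

def find_all_moves_alt (board : List Int) : List (Int × Int) :=
  let n : Int := board.length
  let n_rows := PySem.Int.floordiv n 9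
  let nxt1 := (famB_nxt1 board 0).1
  let tbls := (famB_rows board n_rows n_rows.toNat).1
  (PySem.List.pyRange 0 n 1).foldl (fun moves i =>
    let vi := PySem.List.pyGetD board i 0
    if vi ≤ 0 then moves
    else
      let moves :=
        let k := PySem.List.pyGetD nxt1 i (-1)
        if k ≠ -1 ∧ (vi = PySem.List.pyGetD board k 0 ∨ vi + PySem.List.pyGetD board k 0 = 10)
        then moves ++ [(i, k)] else moves
      let r := PySem.Int.floordiv i 9
      let c := PySem.Int.mod i 9
      if r < n_rows then
        [tbls.1, tbls.2.1, tbls.2.2].foldl (fun moves tbl =>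
          let j := PySem.List.pyGetD (PySem.List.pyGetD tbl r []) c (-1)
          if j ≠ -1 ∧ (vi = PySem.List.pyGetD board j 0 ∨ vi + PySem.List.pyGetD board j 0 = 10)
          then moves ++ [(i, j)] else moves) moves
      else moves
  ) []

-- ===== PRECONDITION & SPEC =====
def Spec_find_all_moves (board : List Int) (out : List (Int × Int)) : Prop := out = find_all_moves_alt board
instance (board : List Int) (out : List (Int × Int)) : Decidable (Spec_find_all_moves board out) := by unfold Spec_find_all_moves; infer_instance

-- ===== CLAIM (what is proved, stated in full; the proofs are below) =====
def Claim_equal_find_all_moves : Prop := ∀ (board : List Int), Dom_find_all_moves board → Spec_find_all_moves board (find_all_moves board)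

-- ===== LEMMAS AND PROOFS =====

-- first index ≥ idx (1D) holding a positive value in the given suffix, else -1
def famS_firstPos : List Int → Int → Int
  | [], _ => -1
  | v :: rest, idx => if 0 < v then idx else famS_firstPos rest (idx + 1)

theorem famB_nxt1_snd (xs : List Int) : ∀ idx, (famB_nxt1 xs idx).2 = famS_firstPos xs idx := by
  induction xs with
  | nil => intro idx; rfl
  | cons v rest ih => intro idx; simp [famB_nxt1, famS_firstPos, ih]

theorem famB_nxt1_get (xs : List Int) : ∀ (idx : Int) (k : Nat), k < xs.length →
    ((famB_nxt1 xs idx).1).getD k (-1) = famS_firstPos (xs.drop (k + 1)) (idx + k + 1) := by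
  induction xs with
  | nil => intro idx k h; simp at h
  | cons v rest ih =>
    intro idx k h
    cases k with
    | zero => simp [famB_nxt1, famB_nxt1_snd]
    | succ k =>
      have := ih (idx + 1) k (by simpa using h)
      simp only [famB_nxt1, List.getD_cons_succ, List.drop_succ_cons]
      rw [this]
      congr 1
      push_cast
      ring

set_option maxRecDepth 4000 in
theorem fam_horiz_eq (board : List Int) (i vi : Int) :
    ∀ (fuelN s : Nat), board.length ≤ s + fuelN → ∀ moves,
    fam_horiz board i vi (PySem.List.pyRange (s : Int) (board.length : Int) 1) moves
    = (let k := famS_firstPos (board.drop s) (s : Int);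
       if k ≠ -1 ∧ (vi = PySem.List.pyGetD board k 0 ∨ vi + PySem.List.pyGetD board k 0 = 10)
       then moves ++ [(i, k)] else moves) := by
  intro fuelN
  induction fuelN with
  | zero =>
    intro s hs moves
    have h1 : PySem.List.pyRange (s : Int) (board.length : Int) 1 = [] :=
      PySem.List.pyRange_one_eq_nil (by exact_mod_cast (by omega : board.length ≤ s))
    have h2 : board.drop s = [] := List.drop_eq_nil_of_le (by omega)
    simp [h1, h2, fam_horiz, famS_firstPos]
  | succ f ih =>
    intro s hs moves
    by_cases hlt : s < board.length
    · rw [PySem.List.pyRange_one_cons (by exact_mod_cast hlt)]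
      have hdrop : board.drop s = board[s] :: board.drop (s + 1) := List.drop_eq_getElem_cons hlt
      have hget : PySem.List.pyGetD board (s : Int) 0 = board[s] := by
        simp [PySem.List.pyGetD_natCast, List.getD, hlt]
      have hcast : ((s : Int) + 1) = ((s + 1 : Nat) : Int) := by push_cast; ring
      by_cases hp : (0 : Int) < board[s]
      · have hne : ((s : Int)) ≠ -1 := by omega
        simp only [fam_horiz, hget, hdrop, famS_firstPos]
        simp only [hp, if_true, hne, ne_eq, not_false_iff, true_and, hget]
      · simp only [fam_horiz, hget, hp, if_false, hdrop, famS_firstPos, hcast]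
        rw [ih (s + 1) (by omega) moves]
    · have h1 : PySem.List.pyRange (s : Int) (board.length : Int) 1 = [] :=
        PySem.List.pyRange_one_eq_nil (by exact_mod_cast (by omega : board.length ≤ s))
      have h2 : board.drop s = [] := List.drop_eq_nil_of_le (by omega)
      simp [h1, h2, fam_horiz, famS_firstPos]

theorem fam_findNext_fuel (board : List Int) (n_rows : Int) :
    ∀ (f g : Nat) (r c dc : Int), n_rows - r < (f : Int) → n_rows - r < (g : Int) →
    fam_findNext board r c 1 dc n_rows f = fam_findNext board r c 1 dc n_rows g := by
  intro f
  induction f with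
  | zero =>
    intro g r c dc hf hg
    cases g with
    | zero => rfl
    | succ g =>
      simp only [fam_findNext]
      rw [if_neg (by omega)]
  | succ f ih =>
    intro g r c dc hf hg
    cases g with
    | zero =>
      simp only [fam_findNext]
      rw [if_neg (by omega)]
    | succ g =>
      simp only [fam_findNext]
      by_cases hc : 0 ≤ r ∧ r < n_rows ∧ 0 ≤ c ∧ c < 9
      · rw [if_pos hc, if_pos hc]
        by_cases hp : 0 < PySem.List.pyGetD board (r * 9 + c) 0
        · rw [if_pos hp, if_pos hp]
        · rw [if_neg hp, if_neg hp]
          exact ih g (r + 1) (c + dc) dc (by omega) (by omega)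
      · rw [if_neg hc, if_neg hc]

theorem fam_findNext_pos (board : List Int) (n_rows : Int) :
    ∀ (f : Nat) (r c dc : Int), fam_findNext board r c 1 dc n_rows f ≠ -1 →
    r * 9 ≤ fam_findNext board r c 1 dc n_rows f ∧
    0 < PySem.List.pyGetD board (fam_findNext board r c 1 dc n_rows f) 0 := by
  intro f
  induction f with
  | zero => intro r c dc h; exact absurd rfl h
  | succ f ih =>
    intro r c dc h
    simp only [fam_findNext] at h ⊢
    by_cases hc : 0 ≤ r ∧ r < n_rows ∧ 0 ≤ c ∧ c < 9
    · rw [if_pos hc] at h ⊢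
      by_cases hp : 0 < PySem.List.pyGetD board (r * 9 + c) 0
      · rw [if_pos hp] at h ⊢
        exact ⟨by omega, hp⟩
      · rw [if_neg hp] at h ⊢
        have := ih (r + 1) (c + dc) dc h
        exact ⟨by omega, this.2⟩
    · rw [if_neg hc] at h
      exact absurd rfl h

theorem getD_map_range9 (f : Nat → Int) (c : Nat) (hc : c < 9) :
    ((List.range 9).map f).getD c (-1) = f c := by
  simp [List.getD_eq_getElem?_getD, hc]

theorem famB_rows_vec (board : List Int) (n_rows : Int) (hn : 0 ≤ n_rows) :
    ∀ (t : Nat), (t : Int) ≤ n_rows → ∀ c : Nat, c < 9 →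
    ((famB_rows board n_rows t).2.1.getD c (-1)
       = fam_findNext board (n_rows - t) c 1 0 n_rows (n_rows.toNat + 1)) ∧
    ((famB_rows board n_rows t).2.2.1.getD c (-1)
       = fam_findNext board (n_rows - t) c 1 1 n_rows (n_rows.toNat + 1)) ∧
    ((famB_rows board n_rows t).2.2.2.getD c (-1)
       = fam_findNext board (n_rows - t) c 1 (-1) n_rows (n_rows.toNat + 1)) := by
  intro t
  induction t with
  | zero =>
    intro _ c hc
    refine ⟨?_, ?_, ?_⟩ <;>
      · simp only [famB_rows]
        rw [fam_findNext, if_neg (by omega)]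
        interval_cases c <;> rfl
  | succ t ih =>
    intro ht c hc
    have ht' : (t : Int) ≤ n_rows := by push_cast at ht ⊢; omega
    have hcond : 0 ≤ n_rows - ((t : Int) + 1) ∧ n_rows - ((t : Int) + 1) < n_rows ∧
        (0 : Int) ≤ (c : Int) ∧ (c : Int) < 9 := ⟨by omega, by omega, by omega, by omega⟩
    have hstep : n_rows - ((t : Int) + 1) + 1 = n_rows - (t : Int) := by ring
    have hfuel := fam_findNext_fuel board n_rows n_rows.toNat (n_rows.toNat + 1)
    refine ⟨?_, ?_, ?_⟩
    · simp only [famB_rows, getD_map_range9 _ c hc]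
      conv_rhs => rw [fam_findNext]
      push_cast
      rw [if_pos hcond]
      split_ifs with h1
      · rfl
      · rw [hstep, show (c : Int) + 0 = (c : Int) from by ring,
            hfuel _ _ _ (by omega) (by omega)]
        exact (ih ht' c hc).1
    · simp only [famB_rows, getD_map_range9 _ c hc]
      conv_rhs => rw [fam_findNext]
      push_cast
      rw [if_pos hcond]
      split_ifs with h1 h2
      · rfl
      · -- c < 8: use the IH at column c+1
        rw [hstep, hfuel _ _ _ (by omega) (by omega)]
        have := (ih ht' (c + 1) (by omega)).2.1
        push_cast at this
        exact this
      · -- c = 8: the scan leaves the grid immediately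
        rw [hstep, show n_rows.toNat = (n_rows.toNat - 1) + 1 from by omega, fam_findNext,
            if_neg (by omega)]
    · simp only [famB_rows, getD_map_range9 _ c hc]
      conv_rhs => rw [fam_findNext]
      push_cast
      rw [if_pos hcond]
      split_ifs with h1 h2
      · rfl
      · -- 0 < c: use the IH at column c-1
        rw [hstep, hfuel _ _ _ (by omega) (by omega)]
        have := (ih ht' (c - 1) (by omega)).2.2
        rw [show ((c - 1 : Nat) : Int) = (c : Int) + -1 from by omega] at this
        exact this
      · -- c = 0: the scan leaves the grid immediately
        rw [hstep, show n_rows.toNat = (n_rows.toNat - 1) + 1 from by omega, fam_findNext,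
            if_neg (by omega)]

theorem famB_rows_get (board : List Int) (n_rows : Int) :
    ∀ (t : Nat) (p : Nat), p < t →
    ((famB_rows board n_rows t).1.1.getD p [] = (famB_rows board n_rows (t - 1 - p)).2.1) ∧
    ((famB_rows board n_rows t).1.2.1.getD p []
       = (List.range 9).map (fun c => if c < 8 then (famB_rows board n_rows (t - 1 - p)).2.2.1.getD (c + 1) (-1) else -1)) ∧
    ((famB_rows board n_rows t).1.2.2.getD p []
       = (List.range 9).map (fun c => if 0 < c then (famB_rows board n_rows (t - 1 - p)).2.2.2.getD (c - 1) (-1) else -1)) := by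
  intro t
  induction t with
  | zero => intro p hp; omega
  | succ t ih =>
    intro p hp
    cases p with
    | zero => exact ⟨rfl, rfl, rfl⟩
    | succ p =>
      have := ih p (by omega)
      rw [show t - 1 - p = t - (p + 1) from by omega] at this
      simpa [famB_rows] using this

theorem fam_dir_cond (board : List Int) (i j : Int) (hi : 0 ≤ i)
    (hb : 0 < PySem.List.pyGetD board i 0)
    (hj : j = -1 ∨ (i < j ∧ 0 < PySem.List.pyGetD board j 0)) (moves : List (Int × Int)) :
    (if j > i ∧ fam_is_valid_pair board i j = true then moves ++ [(i, j)] else moves)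
    = (if j ≠ -1 ∧ (PySem.List.pyGetD board i 0 = PySem.List.pyGetD board j 0 ∨
          PySem.List.pyGetD board i 0 + PySem.List.pyGetD board j 0 = 10)
       then moves ++ [(i, j)] else moves) := by
  rcases hj with rfl | ⟨hij, hbj⟩
  · rw [if_neg (by rintro ⟨h, _⟩; omega), if_neg (by rintro ⟨h, _⟩; exact h rfl)]
  · have hjne : j ≠ -1 := by omega
    have hv : fam_is_valid_pair board i j
        = decide (PySem.List.pyGetD board i 0 = PySem.List.pyGetD board j 0 ∨
            PySem.List.pyGetD board i 0 + PySem.List.pyGetD board j 0 = 10) := by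
      simp only [fam_is_valid_pair]
      rw [if_neg (by omega)]
    rw [hv]
    by_cases hd : (PySem.List.pyGetD board i 0 = PySem.List.pyGetD board j 0 ∨
        PySem.List.pyGetD board i 0 + PySem.List.pyGetD board j 0 = 10)
    · rw [if_pos ⟨hij, by simpa using hd⟩, if_pos ⟨hjne, hd⟩]
    · rw [if_neg (by rintro ⟨_, h⟩; exact hd (by simpa using h)),
          if_neg (by rintro ⟨_, h⟩; exact hd h)]

-- ===== VERDICT (by name: the statement is the Claim_ definition above) =====
theorem find_all_moves_spec : Claim_equal_find_all_moves := by
  intro board _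
  unfold Spec_find_all_moves find_all_moves find_all_moves_alt
  dsimp only
  apply PySem.List.foldl_congr_mem
  intro acc i hmem
  obtain ⟨hi0, hin⟩ := (PySem.List.mem_pyRange_one).1 hmem
  by_cases hb : PySem.List.pyGetD board i 0 ≤ 0
  · rw [if_pos hb, if_pos hb]
  · rw [if_neg hb, if_neg hb]
    push Not at hb
    set n_rows := PySem.Int.floordiv (board.length : Int) 9 with hnr
    set r := PySem.Int.floordiv i 9 with hr
    set c := PySem.Int.mod i 9 with hc
    have hnr0 : 0 ≤ n_rows := by
      rw [hnr, PySem.Int.floordiv_eq_ediv_of_pos (by norm_num)]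
      exact Int.ediv_nonneg (by positivity) (by norm_num)
    have hr0 : 0 ≤ r := by
      rw [hr, PySem.Int.floordiv_eq_ediv_of_pos (by norm_num)]
      exact Int.ediv_nonneg hi0 (by norm_num)
    have hc09 : 0 ≤ c ∧ c < 9 := by
      rw [hc, PySem.Int.mod_eq_emod_of_pos (by norm_num)]
      exact ⟨Int.emod_nonneg i (by norm_num), Int.emod_lt_of_pos i (by norm_num)⟩
    have hi_eq : r * 9 + c = i := by
      rw [hr, hc]; exact PySem.Int.floordiv_mul_add_mod i 9
    -- the horizontal piece
    have hk : PySem.List.pyGetD (famB_nxt1 board 0).1 i (-1)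
        = famS_firstPos (board.drop (i.toNat + 1)) ((i.toNat + 1 : Nat) : Int) := by
      rw [show i = ((i.toNat : Nat) : Int) from (Int.toNat_of_nonneg hi0).symm,
          PySem.List.pyGetD_natCast,
          famB_nxt1_get board 0 i.toNat (by omega),
          show (0 : Int) + (i.toNat : Int) + 1 = ((i.toNat + 1 : Nat) : Int) from by push_cast; ring]
      simp only [Int.toNat_natCast]
    have hH : fam_horiz board i (PySem.List.pyGetD board i 0)
          (PySem.List.pyRange (i + 1) (board.length : Int) 1) acc
        = (if PySem.List.pyGetD (famB_nxt1 board 0).1 i (-1) ≠ -1 ∧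
              (PySem.List.pyGetD board i 0
                  = PySem.List.pyGetD board (PySem.List.pyGetD (famB_nxt1 board 0).1 i (-1)) 0 ∨
               PySem.List.pyGetD board i 0
                  + PySem.List.pyGetD board (PySem.List.pyGetD (famB_nxt1 board 0).1 i (-1)) 0 = 10)
           then acc ++ [(i, PySem.List.pyGetD (famB_nxt1 board 0).1 i (-1))] else acc) := by
      rw [show i + 1 = ((i.toNat + 1 : Nat) : Int) from by omega,
          fam_horiz_eq board i (PySem.List.pyGetD board i 0) board.length (i.toNat + 1)
            (by omega) acc]
      rw [hk]
    by_cases hrlt : r < n_rows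
    · rw [if_pos hrlt]
      -- the three direction pieces: table lookups equal the literal scans
      have hrT : r.toNat < n_rows.toNat := by omega
      have hLle : ((n_rows.toNat - 1 - r.toNat : Nat) : Int) ≤ n_rows := by omega
      have vecs := famB_rows_vec board n_rows hnr0 (n_rows.toNat - 1 - r.toNat) hLle
      have hget := famB_rows_get board n_rows n_rows.toNat r.toNat hrT
      have hnL : n_rows - ((n_rows.toNat - 1 - r.toNat : Nat) : Int) = r + 1 := by omega
      have hcast_r : r = ((r.toNat : Nat) : Int) := (Int.toNat_of_nonneg hr0).symm
      have hcast_c : c = ((c.toNat : Nat) : Int) := (Int.toNat_of_nonneg hc09.1).symm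
      have hd : PySem.List.pyGetD
            (PySem.List.pyGetD (famB_rows board n_rows n_rows.toNat).1.1 r []) c (-1)
          = fam_findNext board (r + 1) (c + 0) 1 0 n_rows (n_rows.toNat + 1) := by
        rw [hcast_r, PySem.List.pyGetD_natCast, hget.1, hcast_c, PySem.List.pyGetD_natCast,
            (vecs c.toNat (by omega)).1, hnL]
        congr 1
        omega
      have hdr : PySem.List.pyGetD
            (PySem.List.pyGetD (famB_rows board n_rows n_rows.toNat).1.2.1 r []) c (-1)
          = fam_findNext board (r + 1) (c + 1) 1 1 n_rows (n_rows.toNat + 1) := by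
        rw [hcast_r, PySem.List.pyGetD_natCast, hget.2.1, hcast_c, PySem.List.pyGetD_natCast,
            getD_map_range9 _ c.toNat (by omega)]
        by_cases h8 : c.toNat < 8
        · rw [if_pos h8, (vecs (c.toNat + 1) (by omega)).2.1, hnL]
          congr 1
          omega
        · rw [if_neg h8, fam_findNext, if_neg (by omega)]
      have hdl : PySem.List.pyGetD
            (PySem.List.pyGetD (famB_rows board n_rows n_rows.toNat).1.2.2 r []) c (-1)
          = fam_findNext board (r + 1) (c + -1) 1 (-1) n_rows (n_rows.toNat + 1) := by
        rw [hcast_r, PySem.List.pyGetD_natCast, hget.2.2, hcast_c, PySem.List.pyGetD_natCast,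
            getD_map_range9 _ c.toNat (by omega)]
        by_cases h0 : 0 < c.toNat
        · have hv := (vecs (c.toNat - 1) (by omega)).2.2
          rw [hnL, show ((c.toNat - 1 : Nat) : Int) = (c.toNat : Int) + -1 from by omega] at hv
          rw [if_pos h0, hv, hcast_r]
          simp only [Int.toNat_natCast]
        · rw [if_neg h0, fam_findNext, if_neg (by omega)]
      have hjgen : ∀ dc : Int,
          fam_findNext board (r + 1) (c + dc) 1 dc n_rows (n_rows.toNat + 1) = -1 ∨
          (i < fam_findNext board (r + 1) (c + dc) 1 dc n_rows (n_rows.toNat + 1) ∧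
           0 < PySem.List.pyGetD board
             (fam_findNext board (r + 1) (c + dc) 1 dc n_rows (n_rows.toNat + 1)) 0) := by
        intro dc
        by_cases h : fam_findNext board (r + 1) (c + dc) 1 dc n_rows (n_rows.toNat + 1) = -1
        · exact Or.inl h
        · have := fam_findNext_pos board n_rows (n_rows.toNat + 1) (r + 1) (c + dc) dc h
          exact Or.inr ⟨by omega, this.2⟩
      simp only [List.foldl]
      rw [hd, hdr, hdl, hH,
          fam_dir_cond board i _ hi0 hb (hjgen 0),
          fam_dir_cond board i _ hi0 hb (hjgen 1),
          fam_dir_cond board i _ hi0 hb (hjgen (-1))]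
    · rw [if_neg hrlt]
      have hj0 : ∀ dc : Int,
          fam_findNext board (r + 1) (c + dc) 1 dc n_rows (n_rows.toNat + 1) = -1 := by
        intro dc
        rw [fam_findNext, if_neg (by omega)]
      rw [hj0 0, hj0 1, hj0 (-1), if_neg (by rintro ⟨h, _⟩; omega),
          if_neg (by rintro ⟨h, _⟩; omega), if_neg (by rintro ⟨h, _⟩; omega), hH]
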